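-- pv_equiv track=rewrite | github.com/MacThanhD21/CodePTIT | Python/PY02028.py | sort_prime
-- ===== SOURCE A (Python) =====
-- import math
--
-- def is_prime(n):
--     if n < 2: return False
--     for i in range(2, int(math.sqrt(n)) + 1):
--         if n % i == 0: return False
--     return True
--
-- def sort_prime(arr):
--     primes = []
--     non_primes = []
--
--     for num in arr:
--         if is_prime(num):
--             primes.append(num)
--         else:
--             non_primes.append(num)
--
--     primes.sort()
--
--     result = []
--     prime_index = 0
--     non_prime_index = 0
--
--     for num in arr:
--         if is_prime(num):
--             result.append(primes[prime_index])
--             prime_index += 1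
--         else:
--             result.append(non_primes[non_prime_index])
--             non_prime_index += 1
--
--     return result
-- ===== SOURCE B (Python) =====
-- import math
--
-- def is_prime(n):
--     if n < 2: return False
--     for i in range(2, int(math.sqrt(n)) + 1):
--         if n % i == 0: return False
--     return True
--
-- def sort_prime(arr):
--     # selection: keep a bag of the prime values and emit its minimum at each
--     # prime position; non-primes are emitted as themselves (no sort call).
--     bag = [v for v in arr if is_prime(v)]
--     out = []
--     for v in arr:
--         if is_prime(v):
--             m = min(bag)
--             bag.remove(m)
--             out.append(m)
--         else:
--             out.append(v)
--     return out
-- ===== Notes on version B (the rewrite author's own statement) =====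
-- stated objective: alternative
-- what changed: B never sorts: it keeps a bag of the prime values and at each prime position extracts the bag's minimum (repeated min-extraction, i.e. selection), emitting non-primes as themselves instead of pulling them from A's second queue.
import Mathlib
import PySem

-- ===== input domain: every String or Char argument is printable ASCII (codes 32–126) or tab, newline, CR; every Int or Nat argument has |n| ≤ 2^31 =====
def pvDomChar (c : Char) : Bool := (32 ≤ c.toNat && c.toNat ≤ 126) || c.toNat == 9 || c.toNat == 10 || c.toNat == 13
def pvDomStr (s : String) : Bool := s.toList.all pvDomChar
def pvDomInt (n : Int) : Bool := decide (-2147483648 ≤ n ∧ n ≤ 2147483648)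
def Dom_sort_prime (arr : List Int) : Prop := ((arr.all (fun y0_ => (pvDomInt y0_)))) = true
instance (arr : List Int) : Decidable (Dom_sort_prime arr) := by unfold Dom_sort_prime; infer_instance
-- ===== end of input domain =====

-- B replaces A's sort-then-rebuild by selection: a bag of the prime values from which the
-- minimum is extracted at each prime position, non-primes emitted as themselves (alternative).

-- ===== PORT A =====
-- is_prime: trial division up to int(math.sqrt(n)); for 2 ≤ n ≤ 2^31 the double sqrt is
-- exact enough that int(math.sqrt(n)) = Nat.sqrt n.toNat, so this port is exact on Dom.
def isPrime (n : Int) : Bool :=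
  if n < 2 then false
  else (List.range' 2 (Nat.sqrt n.toNat + 1 - 2)).all (fun i => !(n % (i : Int) == 0))

-- the second loop of A: walks arr again, consuming the sorted primes / the non-primes
-- as queues (the index increments become consuming the head; the indexing never goes
-- out of range since the queues hold exactly the matching elements, so headD's default
-- is never returned).
def rebuildA : List Int → List Int → List Int → List Int
  | [], _, _ => []
  | x :: xs, ps, nps =>
    if isPrime x then ps.headD 0 :: rebuildA xs ps.tail nps
    else nps.headD 0 :: rebuildA xs ps nps.tail

def sort_prime (arr : List Int) : List Int :=
  rebuildA arr (PySem.List.sorted (arr.filter (fun x => isPrime x)) (fun x => x) false)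
    (arr.filter (fun x => !isPrime x))

-- ===== PORT B =====
-- B's loop: at a prime position take m = min(bag), bag.remove(m), emit m; at a
-- non-prime position emit the element itself.  min([]) / a failing remove raise in
-- Python; those branches are unreachable since the bag holds exactly the prime
-- values still to come, so the `none` fallbacks are never returned.
def rebuildB : List Int → List Int → List Int
  | [], _ => []
  | x :: xs, bag =>
    if isPrime x then
      match PySem.List.min? bag (fun y => y) with
      | none => []                                  -- unreachable: min([]) raises
      | some m => m :: rebuildB xs ((PySem.List.remove? bag m).getD bag)
    else x :: rebuildB xs bag

def sort_prime_alt (arr : List Int) : List Int :=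
  rebuildB arr (arr.filter (fun x => isPrime x))

-- ===== PRECONDITION & SPEC =====
def Spec_sort_prime (arr : List Int) (out : List Int) : Prop := out = sort_prime_alt arr
instance (arr : List Int) (out : List Int) : Decidable (Spec_sort_prime arr out) := by unfold Spec_sort_prime; infer_instance

-- ===== CLAIM (what is proved, stated in full; the proofs are below) =====
def Claim_equal_sort_prime : Prop := ∀ (arr : List Int), Dom_sort_prime arr → Spec_sort_prime arr (sort_prime arr)

-- ===== LEMMAS AND PROOFS =====

-- core invariant: A's rebuild over the pre-sorted queue equals B's min-extraction over the
-- raw bag, whenever the bag has as many elements as xs has primes (the non-prime queue of A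
-- is exactly the non-primes of xs).
theorem rebuildA_sorted_eq_rebuildB (xs : List Int) (bag : List Int)
    (h : bag.length = (xs.filter (fun x => isPrime x)).length) :
    rebuildA xs (PySem.List.sorted bag (fun y => y) false) (xs.filter (fun x => !isPrime x))
      = rebuildB xs bag := by
  induction xs generalizing bag with
  | nil => simp [rebuildA, rebuildB]
  | cons x xs ih =>
    by_cases hp : isPrime x
    · -- prime head: the sorted queue's head is the bag's minimum
      simp only [List.filter_cons, hp, if_pos, List.length_cons] at h
      have hbagne : bag ≠ [] := by
        intro hb; rw [hb] at h; simp at h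
      obtain ⟨m, t, hS⟩ : ∃ m t, PySem.List.sorted bag (fun y => y) false = m :: t := by
        cases hSc : PySem.List.sorted bag (fun y => y) false with
        | nil => exact absurd ((PySem.List.sorted_eq_nil_iff _ _ _).mp hSc) hbagne
        | cons a b => exact ⟨a, b, rfl⟩
      have hperm : (m :: t).Perm bag := hS ▸ PySem.List.sorted_perm ..
      have hmmem : m ∈ bag := hperm.mem_iff.mp (List.mem_cons_self ..)
      have hmin : ∀ y ∈ bag, m ≤ y := PySem.List.key_head_sorted_le bag (fun y : Int => y) hS
      -- min? bag picks the first minimal element; over Int equal values are identical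
      have hmin? : PySem.List.min? bag (fun y => y) = some m := by
        cases hm' : PySem.List.min? bag (fun y => y) with
        | none => exact absurd ((PySem.List.min?_eq_none_iff _ _).mp hm') hbagne
        | some m' =>
          have h1 : m' ≤ m := PySem.List.min?_isMin hm' m hmmem
          have h2 : m ≤ m' := hmin m' (PySem.List.min?_mem hm')
          exact congrArg some (le_antisymm h1 h2)
      have hrem : PySem.List.remove? bag m = some (bag.erase m) :=
        PySem.List.remove?_eq_some_erase bag m hmmem
      -- the sorted queue's tail is sorted(bag with one copy of m removed)
      have hperm' : t.Perm (bag.erase m) :=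
        ((List.perm_cons m).mp (hperm.trans (List.perm_cons_erase hmmem)))
      have hpw : t.Pairwise (fun a b : Int => a ≤ b) := by
        have := PySem.List.sorted_pairwise (xs := bag) (key := fun y : Int => y)
        rw [hS] at this
        exact this.of_cons
      have hSt : PySem.List.sorted (bag.erase m) (fun y : Int => y) false = t :=
        PySem.List.sorted_id_eq_of_perm_of_pairwise (bag.erase m) t hperm' hpw
      have hlen : (bag.erase m).length = (xs.filter (fun x => isPrime x)).length := by
        rw [List.length_erase_of_mem hmmem]; omega
      simp only [rebuildB, hp, if_pos, hmin?, hrem, Option.getD_some]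
      rw [← ih _ hlen, hSt]
      simp only [List.filter_cons, hp, Bool.not_true, hS]
      simp [rebuildA, hp]
    · -- non-prime head: A pops it from the non-prime queue, B emits it directly
      have h' : bag.length = (xs.filter (fun x => isPrime x)).length := by
        simpa [hp] using h
      simp only [List.filter_cons, hp, Bool.not_false, rebuildA, rebuildB,
        Bool.false_eq_true, if_false, if_true, List.headD_cons, List.tail_cons]
      rw [ih _ h']

-- ===== VERDICT (by name: the statement is the Claim_ definition above) =====
theorem sort_prime_spec : Claim_equal_sort_prime := by
  intro arr _
  unfold Spec_sort_prime sort_prime sort_prime_alt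
  exact rebuildA_sorted_eq_rebuildB arr _ rfl
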